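-- pv_equiv track=rewrite | github.com/aquarellian/adventofcode2018 | src/AoC2019/d13t2.py | parse_game
-- ===== SOURCE A (Python) =====
-- def parse_game(res):
--     tiles = {}
--     x = 0
--     y = 0
--     for ind, val in enumerate(res):
--         rem = ind % 3
--         if rem == 0:
--             x = val
--         elif rem == 1:
--             y = val
--         elif rem == 2:
--             tile = ' ' if val == 0 else '#' if val == 1 else '*' if val == 2 else '_' if val == 3 else 'O' if val == 4 else 'WTF'
--             tiles[y] = tiles.get(y, {})
--             tiles[y][x] = tile
--             x = None
--             y = None
--     return tiles
-- ===== SOURCE B (Python) =====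
-- MAP = {0: ' ', 1: '#', 2: '*', 3: '_', 4: 'O'}
--
-- def parse_game(res):
--     tiles = {}
--     for i in range(2, len(res), 3):
--         x, y, val = res[i - 2], res[i - 1], res[i]
--         tiles.setdefault(y, {})[x] = MAP.get(val, 'WTF')
--     return tiles
-- ===== Notes on version B (the rewrite author's own statement) =====
-- stated objective: simpler
-- what changed: Replaced A's enumerate + index-mod-3 state machine (carried x/y variables, per-index branching, nested if-chain for the tile) with a stride-3 index loop over whole triples and a constant lookup table MAP with tiles.setdefault(y, {})[x] = MAP.get(val, 'WTF').
import Mathlib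
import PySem

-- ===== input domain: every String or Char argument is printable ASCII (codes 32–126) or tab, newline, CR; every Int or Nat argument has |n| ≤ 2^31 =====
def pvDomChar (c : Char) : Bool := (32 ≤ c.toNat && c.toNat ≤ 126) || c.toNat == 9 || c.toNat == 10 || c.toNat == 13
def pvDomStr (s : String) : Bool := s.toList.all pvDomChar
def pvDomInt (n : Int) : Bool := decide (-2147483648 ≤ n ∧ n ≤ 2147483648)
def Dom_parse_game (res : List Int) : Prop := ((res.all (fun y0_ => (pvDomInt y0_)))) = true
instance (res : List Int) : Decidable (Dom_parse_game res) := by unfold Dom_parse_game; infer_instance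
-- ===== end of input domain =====

-- B replaces A's index-mod-3 state machine with a stride-3 index loop over whole
-- triples plus a lookup table (objective: simpler — no carried x/y state, no per-index branching).

-- ===== PORT A =====
-- the loop body of A's `for ind, val in enumerate(res)`; state = (tiles, x, y)
-- (x, y are Option Int: Python sets them to None after each triple; at rem == 2 they are
-- always set — indices 3k and 3k+1 precede 3k+2 — so the `getD 0` branch is never taken)
def pvStepA (st : PySem.Dict Int (PySem.Dict Int String) × Option Int × Option Int)
    (iv : Int × Int) : PySem.Dict Int (PySem.Dict Int String) × Option Int × Option Int :=
  match st, iv with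
  | (tiles, x, y), (ind, val) =>
    let rem := PySem.Int.mod ind 3
    if rem = 0 then (tiles, some val, y)
    else if rem = 1 then (tiles, x, some val)
    else if rem = 2 then
      let tile := if val = 0 then " " else if val = 1 then "#" else if val = 2 then "*"
                  else if val = 3 then "_" else if val = 4 then "O" else "WTF"
      -- tiles[y] = tiles.get(y, {}); tiles[y][x] = tile
      (PySem.Dict.insert tiles (y.getD 0)
        ((PySem.Dict.getD tiles (y.getD 0) PySem.Dict.empty).insert (x.getD 0) tile),
       none, none)
    else (tiles, x, y)

def parse_game (res : List Int) : List (Int × List (Int × String)) :=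
  ((PySem.List.enumerate res).foldl pvStepA (PySem.Dict.empty, some 0, some 0)).1.items.map
    (fun p => (p.1, p.2.items))

-- ===== PORT B =====
-- MAP = {0: ' ', 1: '#', 2: '*', 3: '_', 4: 'O'}
def pvMAP : PySem.Dict Int String := ⟨[(0, " "), (1, "#"), (2, "*"), (3, "_"), (4, "O")]⟩

-- the loop body of B's `for i in range(2, len(res), 3)`; the three indices i-2, i-1, i
-- are always in range (2 ≤ i < len(res)), so `pyGetD … 0` is exactly Python's res[_]
def pvBodyB (res : List Int) (tiles : PySem.Dict Int (PySem.Dict Int String)) (i : Int) :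
    PySem.Dict Int (PySem.Dict Int String) :=
  -- x, y, val = res[i-2], res[i-1], res[i]; tiles.setdefault(y, {})[x] = MAP.get(val, 'WTF')
  PySem.Dict.insert tiles (PySem.List.pyGetD res (i - 1) 0)
    ((PySem.Dict.getD tiles (PySem.List.pyGetD res (i - 1) 0) PySem.Dict.empty).insert
      (PySem.List.pyGetD res (i - 2) 0)
      (PySem.Dict.getD pvMAP (PySem.List.pyGetD res i 0) "WTF"))

def parse_game_alt (res : List Int) : List (Int × List (Int × String)) :=
  ((PySem.List.pyRange 2 (res.length : Int) 3).foldl (pvBodyB res) PySem.Dict.empty).items.map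
    (fun p => (p.1, p.2.items))

-- ===== PRECONDITION & SPEC =====
def Spec_parse_game (res : List Int) (out : List (Int × List (Int × String))) : Prop := out = parse_game_alt res
instance (res : List Int) (out : List (Int × List (Int × String))) : Decidable (Spec_parse_game res out) := by unfold Spec_parse_game; infer_instance

-- ===== CLAIM (what is proved, stated in full; the proofs are below) =====
def Claim_equal_parse_game : Prop := ∀ (res : List Int), Dom_parse_game res → Spec_parse_game res (parse_game res)

-- ===== LEMMAS AND PROOFS =====

-- A's tile string for a value
def pvTile (val : Int) : String :=
  if val = 0 then " " else if val = 1 then "#" else if val = 2 then "*"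
  else if val = 3 then "_" else if val = 4 then "O" else "WTF"

-- reference recursion: consume whole triples, update the nested dict
def pvChunkGo : List Int → PySem.Dict Int (PySem.Dict Int String) → PySem.Dict Int (PySem.Dict Int String)
  | x :: y :: v :: t, d =>
      pvChunkGo t (PySem.Dict.insert d y ((PySem.Dict.getD d y PySem.Dict.empty).insert x (pvTile v)))
  | _, d => d

lemma pvMAP_getD (v : Int) : PySem.Dict.getD pvMAP v "WTF" = pvTile v := by
  unfold pvTile
  split_ifs with h0 h1 h2 h3 h4 <;>
    first
      | (subst_vars; decide)
      | (have e0 : ((0 : Int) == v) = false := by simp [Ne.symm h0]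
         have e1 : ((1 : Int) == v) = false := by simp [Ne.symm h1]
         have e2 : ((2 : Int) == v) = false := by simp [Ne.symm h2]
         have e3 : ((3 : Int) == v) = false := by simp [Ne.symm h3]
         have e4 : ((4 : Int) == v) = false := by simp [Ne.symm h4]
         simp [PySem.Dict.getD, PySem.Dict.get?, pvMAP, List.find?, e0, e1, e2, e3, e4])

lemma pvChunkGo_short (t : List Int) (d : PySem.Dict Int (PySem.Dict Int String))
    (h : t.length < 3) : pvChunkGo t d = d := by
  match t with
  | [] => rfl
  | [_] => rfl
  | [_, _] => rfl
  | _ :: _ :: _ :: _ => exact absurd h (by simp only [List.length_cons]; omega)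

-- pyRange with step 3 peels one element
lemma pvPyRange3_cons (a b : Int) :
    PySem.List.pyRange a b 3 = if a < b then a :: PySem.List.pyRange (a + 3) b 3 else [] := by
  rw [PySem.List.pyRange_of_pos a b (by norm_num), PySem.List.pyRange_of_pos (a + 3) b (by norm_num)]
  by_cases hab : a < b
  · simp only [hab, if_true]
    by_cases hab3 : a + 3 < b
    · simp only [hab3, if_true]
      have hc : ((b - a + 3 - 1) / 3).toNat = ((b - (a + 3) + 3 - 1) / 3).toNat + 1 := by omega
      rw [hc, List.range_succ_eq_map, List.map_cons, List.map_map]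
      simp only [Nat.cast_zero, mul_zero, add_zero, List.cons.injEq, true_and]
      refine List.map_congr_left fun k _ => ?_
      simp only [Function.comp_apply, Nat.succ_eq_add_one]
      push_cast; ring
    · simp only [hab3, if_false]
      have hc : ((b - a + 3 - 1) / 3).toNat = 1 := by omega
      rw [hc]
      simp [List.range_succ]
  · simp [hab]

-- the three shapes of A's step at indices 3k, 3k+1, 3k+2
lemma pvStep0 (d : PySem.Dict Int (PySem.Dict Int String)) (xo yo : Option Int) (n val : Int)
    (hn : n % 3 = 0) : pvStepA (d, xo, yo) (n, val) = (d, some val, yo) := by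
  have hm : PySem.Int.mod n 3 = 0 := by
    rw [PySem.Int.mod_eq_emod_of_pos (show (0:Int) < 3 by norm_num)]; omega
  simp only [pvStepA]
  rw [hm]
  norm_num

lemma pvStep1 (d : PySem.Dict Int (PySem.Dict Int String)) (xo yo : Option Int) (n val : Int)
    (hn : n % 3 = 0) : pvStepA (d, xo, yo) (n + 1, val) = (d, xo, some val) := by
  have hm : PySem.Int.mod (n + 1) 3 = 1 := by
    rw [PySem.Int.mod_eq_emod_of_pos (show (0:Int) < 3 by norm_num)]; omega
  simp only [pvStepA]
  rw [hm]
  norm_num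

lemma pvStep2 (d : PySem.Dict Int (PySem.Dict Int String)) (x y : Int) (n val : Int)
    (hn : n % 3 = 0) :
    pvStepA (d, some x, some y) (n + 1 + 1, val) =
      (PySem.Dict.insert d y ((PySem.Dict.getD d y PySem.Dict.empty).insert x (pvTile val)),
       none, none) := by
  have hm : PySem.Int.mod (n + 1 + 1) 3 = 2 := by
    rw [PySem.Int.mod_eq_emod_of_pos (show (0:Int) < 3 by norm_num)]; omega
  simp only [pvStepA, pvTile]
  rw [hm]
  norm_num

-- A's fold over enumerate, from any start index ≡ 0 (mod 3), is the triple recursion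
lemma pvAfold (t : List Int) : ∀ (n : Int) (d : PySem.Dict Int (PySem.Dict Int String))
    (xo yo : Option Int), n % 3 = 0 →
    (List.foldl pvStepA (d, xo, yo) (PySem.List.enumerate t n)).1 = pvChunkGo t d := by
  have H : ∀ (L : Nat) (t : List Int), t.length ≤ L → ∀ (n : Int) d (xo yo : Option Int),
      n % 3 = 0 → (List.foldl pvStepA (d, xo, yo) (PySem.List.enumerate t n)).1 = pvChunkGo t d := by
    intro L
    induction L with
    | zero =>
        intro t ht n d xo yo hn
        match t, ht with
        | [], _ => rfl
    | succ L ih =>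
        intro t ht n d xo yo hn
        match t with
        | [] => rfl
        | [x] =>
            simp only [PySem.List.enumerate, List.foldl_cons, List.foldl_nil]
            rw [pvStep0 d xo yo n x hn]
            rfl
        | [x, y] =>
            simp only [PySem.List.enumerate, List.foldl_cons, List.foldl_nil]
            rw [pvStep0 d xo yo n x hn, pvStep1 d (some x) yo n y hn]
            rfl
        | x :: y :: v :: rest =>
            simp only [PySem.List.enumerate, List.foldl_cons]
            rw [pvStep0 d xo yo n x hn, pvStep1 d (some x) yo n y hn,
              pvStep2 d x y n v hn, pvChunkGo]
            have hlen : rest.length ≤ L := by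
              have := ht; simp only [List.length_cons] at this; omega
            exact ih rest hlen (n + 1 + 1 + 1) _ none none (by omega)
  exact H t.length t le_rfl

-- B's fold over range(2, len, 3), from triple number k on, is the triple recursion on drop (3k)
lemma pvBfold (res : List Int) : ∀ (m : Nat) (k : Nat) (d : PySem.Dict Int (PySem.Dict Int String)),
    res.length ≤ 3 * k + m →
    (PySem.List.pyRange (2 + 3 * (k : Int)) (res.length : Int) 3).foldl (pvBodyB res) d
      = pvChunkGo (res.drop (3 * k)) d := by
  intro m
  induction m with
  | zero =>
      intro k d hk
      rw [pvPyRange3_cons, if_neg (by omega), List.foldl_nil,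
        pvChunkGo_short _ d (by simp; omega)]
  | succ m ih =>
      intro k d hk
      by_cases hlt : 3 * k + 2 < res.length
      · have e0 : res.drop (3 * k) = res[3 * k] :: res.drop (3 * k + 1) :=
          List.drop_eq_getElem_cons (by omega)
        have e1 : res.drop (3 * k + 1) = res[3 * k + 1] :: res.drop (3 * k + 2) :=
          List.drop_eq_getElem_cons (by omega)
        have e2 : res.drop (3 * k + 2) = res[3 * k + 2] :: res.drop (3 * k + 3) :=
          List.drop_eq_getElem_cons (by omega)
        rw [pvPyRange3_cons, if_pos (by omega), List.foldl_cons]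
        have hbody : pvBodyB res d (2 + 3 * (k : Int)) =
            PySem.Dict.insert d res[3 * k + 1]
              ((PySem.Dict.getD d res[3 * k + 1] PySem.Dict.empty).insert res[3 * k]
                (pvTile res[3 * k + 2])) := by
          unfold pvBodyB
          rw [show (2 + 3 * (k : Int) - 2) = ((3 * k : Nat) : Int) by push_cast; ring,
              show (2 + 3 * (k : Int) - 1) = ((3 * k + 1 : Nat) : Int) by push_cast; ring,
              show (2 + 3 * (k : Int)) = ((3 * k + 2 : Nat) : Int) by push_cast; ring]
          rw [PySem.List.pyGetD_natCast, PySem.List.pyGetD_natCast, PySem.List.pyGetD_natCast]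
          rw [List.getD_eq_getElem res 0 (by omega : 3 * k < res.length),
              List.getD_eq_getElem res 0 (by omega : 3 * k + 1 < res.length),
              List.getD_eq_getElem res 0 (by omega : 3 * k + 2 < res.length), pvMAP_getD]
        rw [hbody, e0, e1, e2, pvChunkGo,
            show (2 + 3 * (k : Int) + 3) = (2 + 3 * ((k + 1 : Nat) : Int)) by push_cast; ring]
        have := ih (k + 1) (PySem.Dict.insert d res[3 * k + 1]
          ((PySem.Dict.getD d res[3 * k + 1] PySem.Dict.empty).insert res[3 * k]
            (pvTile res[3 * k + 2]))) (by omega)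
        rw [this, show 3 * (k + 1) = 3 * k + 3 by ring]
      · rw [pvPyRange3_cons, if_neg (by omega), List.foldl_nil,
          pvChunkGo_short _ d (by simp; omega)]

-- ===== VERDICT (by name: the statement is the Claim_ definition above) =====
theorem parse_game_spec : Claim_equal_parse_game := by
  intro res _
  unfold Spec_parse_game parse_game parse_game_alt
  have hA := pvAfold res 0 PySem.Dict.empty (some 0) (some 0) (by norm_num)
  have hB := pvBfold res res.length 0 PySem.Dict.empty (by omega)
  simp only [Nat.cast_zero, mul_zero, add_zero, List.drop_zero] at hB
  rw [hA, ← hB]
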